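-- pv_equiv track=rewrite | github.com/Tele-AI/TeleSpeech-ASR | wenet_representation/wenet/discrete_token/dump_pretrain_feature.py | cal_samples
-- ===== SOURCE A (Python) =====
-- def cal_samples(down_sample_rate=320):
--     if down_sample_rate == 2:
--         feature_enc_layers = [(512, 3, 2)]
--     elif down_sample_rate == 4:
--         feature_enc_layers = [(512, 3, 2), (512, 3, 2)]
--     elif down_sample_rate == 8:
--         feature_enc_layers = [(512, 5, 2), (512, 3, 2), (512, 3, 2)]
--     else:
--         feature_enc_layers = [(512, 10, 5)] + [(512, 3, 2)] * 4 + [(512, 2, 2)] + [(512, 2, 2)]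
--
--     jin = 0
--     rin = 0
--     for _, k, stride in feature_enc_layers:
--         if rin == 0:
--             rin = k
--         rin = rin + (k - 1) * jin
--         if jin == 0:
--             jin = stride
--         else:
--             jin *= stride
--     return rin
-- ===== SOURCE B (Python) =====
-- def cal_samples(down_sample_rate=320):
--     # The conv stack is fixed per branch, so its receptive field is a constant:
--     # precomputed via r=1; for (_,k,s) in reversed(layers): r=(r-1)*s+k.
--     receptive_field = {2: 3, 4: 7, 8: 17}
--     return receptive_field.get(down_sample_rate, 400)
-- ===== Notes on version B (the rewrite author's own statement) =====
-- stated objective: simpler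
-- what changed: Since each branch selects a fixed conv stack, B replaces building the layer list and running the jump/receptive-field loop with a precomputed lookup table of the four constant receptive-field values.
import Mathlib
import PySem

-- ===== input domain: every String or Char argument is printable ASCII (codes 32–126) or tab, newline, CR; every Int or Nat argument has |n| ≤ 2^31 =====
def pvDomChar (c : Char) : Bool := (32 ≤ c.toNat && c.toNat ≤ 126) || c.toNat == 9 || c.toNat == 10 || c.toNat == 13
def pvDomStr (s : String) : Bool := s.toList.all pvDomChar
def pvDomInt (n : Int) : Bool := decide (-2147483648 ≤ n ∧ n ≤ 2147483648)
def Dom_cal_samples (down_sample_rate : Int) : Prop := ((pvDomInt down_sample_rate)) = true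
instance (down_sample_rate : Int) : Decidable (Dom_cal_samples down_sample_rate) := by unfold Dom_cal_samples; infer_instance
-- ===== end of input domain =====

-- B replaces building the layer list and running the jump/receptive-field loop
-- with a lookup table of the four constant receptive-field values (simpler).


-- ===== PORT A =====
def cal_samples (down_sample_rate : Int) : Int :=
  let feature_enc_layers : List (Int × Int × Int) :=
    if down_sample_rate == 2 then [(512, 3, 2)]
    else if down_sample_rate == 4 then [(512, 3, 2), (512, 3, 2)]
    else if down_sample_rate == 8 then [(512, 5, 2), (512, 3, 2), (512, 3, 2)]
    else [(512, 10, 5)] ++ List.replicate 4 (512, 3, 2) ++ [(512, 2, 2)] ++ [(512, 2, 2)]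
  let st := feature_enc_layers.foldl
    (fun (st : Int × Int) l =>
      let jin := st.1
      let rin := st.2
      let k := l.2.1
      let stride := l.2.2
      let rin := if rin == 0 then k else rin
      let rin := rin + (k - 1) * jin
      let jin := if jin == 0 then stride else jin * stride
      (jin, rin)) (0, 0)
  st.2

-- ===== PORT B =====
def cal_samples_alt (down_sample_rate : Int) : Int :=
  let receptive_field : PySem.Dict Int Int := PySem.Dict.ofList [(2, 3), (4, 7), (8, 17)]
  PySem.Dict.getD receptive_field down_sample_rate 400

-- ===== PRECONDITION & SPEC =====
def Spec_cal_samples (down_sample_rate : Int) (out : Int) : Prop := out = cal_samples_alt down_sample_rate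
instance (down_sample_rate : Int) (out : Int) : Decidable (Spec_cal_samples down_sample_rate out) := by unfold Spec_cal_samples; infer_instance

-- ===== CLAIM (what is proved, stated in full; the proofs are below) =====
def Claim_equal_cal_samples : Prop := ∀ (down_sample_rate : Int), Dom_cal_samples down_sample_rate → Spec_cal_samples down_sample_rate (cal_samples down_sample_rate)

-- ===== LEMMAS AND PROOFS =====

-- ===== VERDICT (by name: the statement is the Claim_ definition above) =====
theorem cal_samples_spec : Claim_equal_cal_samples := by
  intro d _
  unfold Spec_cal_samples cal_samples cal_samples_alt
  by_cases h2 : d = 2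
  · subst h2; decide
  by_cases h4 : d = 4
  · subst h4; decide
  by_cases h8 : d = 8
  · subst h8; decide
  simp only [beq_iff_eq, if_neg h2, if_neg h4, if_neg h8]
  have he : PySem.Dict.ofList ([(2, 3), (4, 7), (8, 17)] : List (Int × Int))
      = PySem.Dict.mk [(2, 3), (4, 7), (8, 17)] := by decide
  have h2' : ((2:Int) == d) = false := by simp [Ne.symm h2]
  have h4' : ((4:Int) == d) = false := by simp [Ne.symm h4]
  have h8' : ((8:Int) == d) = false := by simp [Ne.symm h8]
  simp [PySem.Dict.getD, he, PySem.Dict.get?_mk_cons, h2', h4', h8', PySem.Dict.get?]
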